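-- pv_equiv track=rewrite | github.com/longlivesquare/Backend-Development | Day04/genome_seq_alg.py | count_genome_in_dna
-- ===== SOURCE A (Python) =====
-- def count_genome_in_dna(dna, find, size):
--     count = 0 # holds number of times the find string has been found
--     pos = 0 # current position within the dna string
--     len_find = len(find) # store the len of find so that I don't have to make repeated calls to len
--
--     # loop through the dna string
--     while (pos < len(dna)):
--         subseq_pos = pos # represents the position in the subsequence
--         while (subseq_pos < (pos+size-len_find)):
--             if (find == dna[subseq_pos:subseq_pos+len_find]):
--                 # if the characters at the current position in the substring are find, increment count
--                 count += 1
--             subseq_pos += 1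
--         pos += size # increment to the next subsequence
--     return count
-- ===== SOURCE B (Python) =====
-- def count_genome_in_dna(dna, find, size):
--     # Scan the occurrences of `find` with str.find, then test the within-block
--     # window condition arithmetically (p % size < size - len(find)).
--     count = 0
--     limit = size - len(find)
--     if limit <= 0:
--         return 0
--     p = dna.find(find)
--     while p != -1:
--         if p % size < limit:
--             count += 1
--         p = dna.find(find, p + 1)
--     return count
-- ===== Notes on version B (the rewrite author's own statement) =====
-- stated objective: alternative
-- what changed: Instead of A's nested block loops that slice-compare at every position (including phantom positions past the end of dna), B enumerates the occurrences of find with str.find and counts those whose offset satisfies the block-window condition p % size < size - len(find).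
-- intended difference: For empty find (with size > 0), A also counts the phantom positions of its last block that lie beyond the end of dna, returning size*ceil(n/size), while B counts exactly the n+1 real positions at which the empty string occurs; these agree only when size >= 2 and n % size == size-1, and B's count of actual occurrences is the intended value. — e.g. on count_genome_in_dna("ACAG", "", 3): A returns 6, B returns 5
import Mathlib
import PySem

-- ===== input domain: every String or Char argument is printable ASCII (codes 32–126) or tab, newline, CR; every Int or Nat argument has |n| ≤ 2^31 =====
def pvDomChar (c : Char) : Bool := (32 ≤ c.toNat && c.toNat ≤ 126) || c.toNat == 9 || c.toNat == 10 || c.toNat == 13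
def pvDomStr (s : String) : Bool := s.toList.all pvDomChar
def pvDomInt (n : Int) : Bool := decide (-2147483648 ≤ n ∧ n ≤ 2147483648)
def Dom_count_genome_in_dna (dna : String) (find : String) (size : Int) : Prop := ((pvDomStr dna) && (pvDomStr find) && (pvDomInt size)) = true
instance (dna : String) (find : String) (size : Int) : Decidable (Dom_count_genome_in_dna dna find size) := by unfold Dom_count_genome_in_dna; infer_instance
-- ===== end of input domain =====

-- B replaces A's nested block scan by enumerating the occurrences of `find` with
-- str.find and testing the block-window condition arithmetically (alternative
-- algorithm, same cost; return value only, no mutation).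

-- ===== PORT A =====
-- inner while loop: subseq_pos runs over [pos, pos+size-len_find), counting slice matches
def pvAinner (L F : List Char) (m size pos count : Int) : Int :=
  (PySem.List.pyRange pos (pos + size - m) 1).foldl
    (fun acc sp => if PySem.List.slice L (some sp) (some (sp + m)) = F then acc + 1 else acc) count

-- outer while loop: pos advances by size while pos < len(dna); the fuel only makes the
-- recursion total (it is never exhausted when 0 < size ∨ dna = "", i.e. under Pre_)
def pvAouter (L F : List Char) (m size : Int) : Int → Int → Nat → Int
  | _pos, count, 0 => count
  | pos, count, fuel+1 =>
    if pos < (L.length : Int) then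
      pvAouter L F m size (pos + size) (pvAinner L F m size pos count) fuel
    else count

def count_genome_in_dna (dna : String) (find : String) (size : Int) : Int :=
  pvAouter dna.toList find.toList (find.toList.length : Int) size 0 0 (dna.toList.length + 1)

-- ===== PORT B =====
-- while p != -1: test p % size < limit; p = dna.find(find, p+1).  Fuel only makes the
-- recursion total (occurrence positions strictly increase, so it is never exhausted).
def pvBloop (L F : List Char) (size limit : Int) : Int → Int → Nat → Int
  | _p, count, 0 => count
  | p, count, fuel+1 =>
    if p = -1 then count
    else pvBloop L F size limit (PySem.Chars.findFrom L F (p + 1) none)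
          (if PySem.Int.mod p size < limit then count + 1 else count) fuel

def count_genome_in_dna_alt (dna : String) (find : String) (size : Int) : Int :=
  let L := dna.toList
  let F := find.toList
  let limit := size - (F.length : Int)
  if limit ≤ 0 then 0
  else pvBloop L F size limit (PySem.Chars.findFrom L F 0 none) 0 (L.length + 2)

-- ===== PRECONDITION & SPEC =====
-- Pre_ excludes size ≤ 0 with nonempty dna: there A's outer loop never advances past
-- len(dna) and the Python diverges (no return value).
def Pre_count_genome_in_dna (dna : String) (find : String) (size : Int) : Prop :=
  0 < size ∨ dna.toList = []
instance (dna : String) (find : String) (size : Int) : Decidable (Pre_count_genome_in_dna dna find size) := by unfold Pre_count_genome_in_dna; infer_instance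
def pvWitness_count_genome_in_dna : String × String × Int := ("ACGTACG", "CG", 3)

-- For empty find (with 0 < size), A also counts the phantom positions of its last block
-- beyond the end of dna, returning size*ceil(n/size); B counts the n+1 real positions at
-- which "" occurs, the intended value; the two agree exactly when 2 ≤ size ∧ n % size = size-1.
def D_count_genome_in_dna (dna : String) (find : String) (size : Int) : Prop :=
  find.toList = [] ∧ 0 < size ∧
    ¬(2 ≤ size ∧ PySem.Int.mod (dna.toList.length : Int) size = size - 1)
instance (dna : String) (find : String) (size : Int) : Decidable (D_count_genome_in_dna dna find size) := by unfold D_count_genome_in_dna; infer_instance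

def Spec_count_genome_in_dna (dna : String) (find : String) (size : Int) (out : Int) : Prop :=
  ¬ D_count_genome_in_dna dna find size → out = count_genome_in_dna_alt dna find size
instance (dna : String) (find : String) (size : Int) (out : Int) : Decidable (Spec_count_genome_in_dna dna find size out) := by unfold Spec_count_genome_in_dna; infer_instance

def pvDiffWitness_count_genome_in_dna : String × String × Int := ("ACAG", "", 3)
def pvDiffWitnessOut_count_genome_in_dna : Int × Int := (6, 5)

-- ===== CLAIM (what is proved, stated in full; the proofs are below) =====
def Claim_unchanged_count_genome_in_dna : Prop := ∀ (dna : String) (find : String) (size : Int), Dom_count_genome_in_dna dna find size → Pre_count_genome_in_dna dna find size → Spec_count_genome_in_dna dna find size (count_genome_in_dna dna find size)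
def Claim_changed_count_genome_in_dna : Prop := Dom_count_genome_in_dna (pvDiffWitness_count_genome_in_dna.1) (pvDiffWitness_count_genome_in_dna.2.1) (pvDiffWitness_count_genome_in_dna.2.2) ∧ Pre_count_genome_in_dna (pvDiffWitness_count_genome_in_dna.1) (pvDiffWitness_count_genome_in_dna.2.1) (pvDiffWitness_count_genome_in_dna.2.2) ∧ D_count_genome_in_dna (pvDiffWitness_count_genome_in_dna.1) (pvDiffWitness_count_genome_in_dna.2.1) (pvDiffWitness_count_genome_in_dna.2.2) ∧ count_genome_in_dna (pvDiffWitness_count_genome_in_dna.1) (pvDiffWitness_count_genome_in_dna.2.1) (pvDiffWitness_count_genome_in_dna.2.2) = pvDiffWitnessOut_count_genome_in_dna.1 ∧ count_genome_in_dna_alt (pvDiffWitness_count_genome_in_dna.1) (pvDiffWitness_count_genome_in_dna.2.1) (pvDiffWitness_count_genome_in_dna.2.2) = pvDiffWitnessOut_count_genome_in_dna.2 ∧ pvDiffWitnessOut_count_genome_in_dna.1 ≠ pvDiffWitnessOut_count_genome_in_dna.2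
def Claim_exact_count_genome_in_dna : Prop := ∀ (dna : String) (find : String) (size : Int), Dom_count_genome_in_dna dna find size → Pre_count_genome_in_dna dna find size → D_count_genome_in_dna dna find size → count_genome_in_dna dna find size ≠ count_genome_in_dna_alt dna find size

-- ===== LEMMAS AND PROOFS =====

-- ceiling division a / b for 0 < b, as -((-a) // b)
def pvCeil (a b : Int) : Int := -(PySem.Int.floordiv (-a) b)

lemma pvCeil_bracket {a b : Int} (hb : 0 < b) :
    (pvCeil a b - 1) * b < a ∧ a ≤ pvCeil a b * b :=
  (PySem.Int.neg_floordiv_neg_eq_iff_of_pos hb).mp rfl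

-- the condition A effectively tests at an absolute position p (match ∧ window offset small)
def pvCond (L F : List Char) (size p : Int) : Bool :=
  decide (PySem.List.slice L (some p) (some (p + (F.length : Int))) = F) &&
    decide (PySem.Int.mod p size < size - (F.length : Int))

-- the condition B tests at an occurrence position p
def pvOcc (L F : List Char) (size p : Int) : Bool :=
  decide (F <+: L.drop p.toNat) && decide (PySem.Int.mod p size < size - (F.length : Int))

lemma pvAinner_eq (L F : List Char) (m size pos count : Int) :
    pvAinner L F m size pos count =
      count + ((PySem.List.pyRange pos (pos + size - m) 1).countP
        (fun sp => decide (PySem.List.slice L (some sp) (some (sp + m)) = F)) : Int) := by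
  exact PySem.List.foldl_ite_add_one _ _ _

lemma pvMod_block {size pos p : Int} (hs : 0 < size) (hd : size ∣ pos)
    (h1 : pos ≤ p) (h2 : p < pos + size) : PySem.Int.mod p size = p - pos := by
  obtain ⟨k, hk⟩ := hd
  rw [PySem.Int.mod_eq_emod_of_pos hs]
  have e1 : p % size = (p - pos) % size := by
    conv_lhs => rw [show p = (p - pos) + size * k by omega]
    rw [Int.add_mul_emod_self_left]
  rw [e1, Int.emod_eq_of_lt (by omega) (by omega)]

lemma pvBlock_count (L F : List Char) {size pos : Int} (hs : 0 < size) (hd : size ∣ pos)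
    (hp : 0 ≤ pos) :
    ((PySem.List.pyRange pos (pos + size) 1).countP (pvCond L F size)) =
      ((PySem.List.pyRange pos (pos + size - (F.length : Int)) 1).countP
        (fun sp => decide (PySem.List.slice L (some sp) (some (sp + (F.length : Int))) = F))) := by
  by_cases hm : size - (F.length : Int) ≤ 0
  · rw [PySem.List.pyRange_one_eq_nil (a := pos) (b := pos + size - (F.length : Int)) (by omega)]
    simp only [List.countP_nil]
    rw [List.countP_eq_zero]
    intro p hmem
    rw [PySem.List.mem_pyRange_one] at hmem
    have hnn := PySem.Int.mod_nonneg p hs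
    simp only [pvCond, Bool.and_eq_true, decide_eq_true_eq]
    rintro ⟨-, hlt⟩
    omega
  · rw [PySem.List.pyRange_one_append pos (pos + size - (F.length : Int)) (pos + size)
      (by omega) (by omega), List.countP_append]
    have h2 : ((PySem.List.pyRange (pos + size - (F.length : Int)) (pos + size) 1).countP
        (pvCond L F size)) = 0 := by
      rw [List.countP_eq_zero]
      intro p hmem
      rw [PySem.List.mem_pyRange_one] at hmem
      have hmod : PySem.Int.mod p size = p - pos := pvMod_block hs hd (by omega) (by omega)
      simp only [pvCond, Bool.and_eq_true, decide_eq_true_eq]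
      rintro ⟨-, hlt⟩
      omega
    have h1 : ((PySem.List.pyRange pos (pos + size - (F.length : Int)) 1).countP
        (pvCond L F size)) = ((PySem.List.pyRange pos (pos + size - (F.length : Int)) 1).countP
        (fun sp => decide (PySem.List.slice L (some sp) (some (sp + (F.length : Int))) = F))) := by
      apply List.countP_congr
      intro p hmem
      rw [PySem.List.mem_pyRange_one] at hmem
      have hmod : PySem.Int.mod p size = p - pos := pvMod_block hs hd (by omega) (by omega)
      simp only [pvCond, Bool.and_eq_true, decide_eq_true_eq]
      constructor
      · rintro ⟨h, _⟩; exact h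
      · intro h; exact ⟨h, by omega⟩
    omega

lemma pvAouter_eq (L F : List Char) (size : Int) (hs : 0 < size) :
    ∀ (fuel : Nat) (pos count : Int), 0 ≤ pos → size ∣ pos →
      (L.length : Int) ≤ pos + fuel * size →
      pvAouter L F (F.length : Int) size pos count fuel =
        count + ((PySem.List.pyRange pos (pos + size * pvCeil ((L.length : Int) - pos) size) 1).countP
          (pvCond L F size) : Int) := by
  intro fuel
  induction fuel with
  | zero =>
    intro pos count hp _hd hle
    simp only [pvAouter]
    have hc : size * pvCeil ((L.length : Int) - pos) size ≤ 0 := by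
      have hb := pvCeil_bracket (a := (L.length : Int) - pos) hs
      have hcn : pvCeil ((L.length : Int) - pos) size ≤ 0 := by
        by_contra hcc
        push_neg at hcc
        have hnn : 0 ≤ (pvCeil ((L.length : Int) - pos) size - 1) * size :=
          mul_nonneg (by omega) hs.le
        push_cast at hle
        have := hb.1
        omega
      nlinarith
    rw [PySem.List.pyRange_one_eq_nil (by omega)]
    simp
  | succ fuel ih =>
    intro pos count hp hd hle
    by_cases hlt : pos < (L.length : Int)
    · have hb := pvCeil_bracket (a := (L.length : Int) - pos) hs
      set c := pvCeil ((L.length : Int) - pos) size with hcdef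
      have e1 : (c - 1) * size = c * size - size := by ring
      have hc1 : 1 ≤ c := by
        by_contra hcc
        push_neg at hcc
        have hc0 : c ≤ 0 := by omega
        nlinarith [hb.2]
      have hX : size ≤ c * size := by nlinarith
      have hceil' : pvCeil ((L.length : Int) - (pos + size)) size = c - 1 := by
        apply (PySem.Int.neg_floordiv_neg_eq_iff_of_pos hs).mpr
        constructor
        · have e2 : (c - 1 - 1) * size = (c - 1) * size - size := by ring
          linarith [hb.1]
        · linarith [hb.2, e1]
      simp only [pvAouter, if_pos hlt]
      rw [ih (pos + size) _ (by omega) (by exact Dvd.dvd.add hd (Dvd.intro 1 (by ring)))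
        (by push_cast at hle ⊢; linarith)]
      rw [pvAinner_eq, hceil']
      rw [show pos + size + size * (c - 1) = pos + size * c by ring]
      rw [PySem.List.pyRange_one_append pos (pos + size) (pos + size * c) (by omega)
        (by linarith), List.countP_append]
      rw [← pvBlock_count L F hs hd hp]
      push_cast
      ring
    · simp only [pvAouter, if_neg hlt]
      have hb := pvCeil_bracket (a := (L.length : Int) - pos) hs
      have hc : size * pvCeil ((L.length : Int) - pos) size ≤ 0 := by
        have hcn : pvCeil ((L.length : Int) - pos) size ≤ 0 := by
          by_contra hcc
          push_neg at hcc
          have hnn : 0 ≤ (pvCeil ((L.length : Int) - pos) size - 1) * size :=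
            mul_nonneg (by omega) hs.le
          have := hb.1
          omega
        nlinarith
      rw [PySem.List.pyRange_one_eq_nil (by omega)]
      simp

lemma pvA_char (dna find : String) (size : Int) (hs : 0 < size) :
    count_genome_in_dna dna find size =
      ((PySem.List.pyRange 0 (size * pvCeil (dna.toList.length : Int) size) 1).countP
        (pvCond dna.toList find.toList size) : Int) := by
  have hle : (dna.toList.length : Int) ≤ 0 + ((dna.toList.length + 1 : Nat) : Int) * size := by
    have h1 : ((dna.toList.length : Int) + 1) * 1 ≤ ((dna.toList.length : Int) + 1) * size := by
      apply mul_le_mul_of_nonneg_left (by omega) (by positivity)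
    push_cast
    linarith
  have := pvAouter_eq dna.toList find.toList size hs (dna.toList.length + 1) 0 0 le_rfl
    (dvd_zero size) hle
  unfold count_genome_in_dna
  rw [this, show (0 : Int) + size * pvCeil ((dna.toList.length : Int) - 0) size
    = size * pvCeil (dna.toList.length : Int) size by rw [sub_zero, zero_add]]
  ring

lemma pvFindFrom_past (s sub : List Char) (start : Int) (h : (s.length : Int) < start) :
    PySem.Chars.findFrom s sub start none = -1 := by
  simp only [PySem.Chars.findFrom]
  have h0 : ¬ start < 0 := by omega
  simp [h0, h]

lemma pvBloop_eq (L F : List Char) (size : Int) (hs : 0 < size - (F.length : Int)) :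
    ∀ (fuel : Nat) (start count : Int), 0 ≤ start → start ≤ (L.length : Int) + 1 →
      ((L.length : Int) + 2 - start).toNat ≤ fuel →
      pvBloop L F size (size - (F.length : Int)) (PySem.Chars.findFrom L F start none) count fuel =
        count + ((PySem.List.pyRange start ((L.length : Int) + 1) 1).countP
          (pvOcc L F size) : Int) := by
  intro fuel
  induction fuel with
  | zero =>
    intro start count h0 h1 h2
    exfalso
    omega
  | succ fuel ih =>
    intro start count h0 h1 h2
    by_cases hend : start = (L.length : Int) + 1
    · have hpast : PySem.Chars.findFrom L F start none = -1 :=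
        pvFindFrom_past L F start (by omega)
      rw [hpast]
      simp only [pvBloop, if_pos rfl]
      rw [hend, PySem.List.pyRange_one_eq_nil (le_refl _)]
      simp
    · -- start ≤ L.length
      obtain ⟨k, hk⟩ : ∃ k : Nat, start = (k : Int) := ⟨start.toNat, by omega⟩
      have hkle : k ≤ L.length := by omega
      by_cases hf : PySem.Chars.findFrom L F start none = -1
      · rw [hf]
        simp only [pvBloop, if_pos rfl]
        have hno : ¬ F <:+: L.drop k := by
          rw [← PySem.Chars.findFrom_natCast_eq_neg_one_iff L F k hkle, ← hk]
          exact hf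
        have hz : ((PySem.List.pyRange start ((L.length : Int) + 1) 1).countP
            (pvOcc L F size)) = 0 := by
          rw [List.countP_eq_zero]
          intro p hmem
          rw [PySem.List.mem_pyRange_one] at hmem
          simp only [pvOcc, Bool.and_eq_true, decide_eq_true_eq]
          rintro ⟨hpre, -⟩
          apply hno
          have hsplit : L.drop p.toNat = (L.drop k).drop (p.toNat - k) := by
            rw [List.drop_drop]
            congr 1
            omega
          rw [hsplit] at hpre
          exact hpre.isInfix.trans (List.drop_suffix _ _).isInfix
        rw [hz]
        simp
      · set p0 := PySem.Chars.findFrom L F start none with hp0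
        have hspec := PySem.Chars.findFrom_natCast_spec L F k hkle (by rw [← hk]; exact hf)
        rw [← hk] at hspec
        obtain ⟨hge, hpre0, hmin⟩ := hspec
        have hp0le : p0 ≤ (L.length : Int) := by
          rw [hp0, hk, PySem.Chars.findFrom_natCast L F k hkle]
          split
          · omega
          · have h1 := PySem.Chars.find_le_length (L.drop k) F
            rw [List.length_drop] at h1
            omega
        have hp0nn : 0 ≤ p0 := by omega
        simp only [pvBloop, if_neg hf]
        rw [ih (p0 + 1) _ (by omega) (by omega) (by omega)]
        have hsplit1 : PySem.List.pyRange start ((L.length : Int) + 1) 1 =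
            PySem.List.pyRange start p0 1 ++ PySem.List.pyRange p0 ((L.length : Int) + 1) 1 :=
          PySem.List.pyRange_one_append _ _ _ (by omega) (by omega)
        have hsplit2 : PySem.List.pyRange p0 ((L.length : Int) + 1) 1 =
            p0 :: PySem.List.pyRange (p0 + 1) ((L.length : Int) + 1) 1 :=
          PySem.List.pyRange_one_cons (by omega)
        have hz : ((PySem.List.pyRange start p0 1).countP (pvOcc L F size)) = 0 := by
          rw [List.countP_eq_zero]
          intro p hmem
          rw [PySem.List.mem_pyRange_one] at hmem
          simp only [pvOcc, Bool.and_eq_true, decide_eq_true_eq]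
          rintro ⟨hpre, -⟩
          exact hmin p.toNat (by omega) (by omega) hpre
        rw [hsplit1, hsplit2, List.countP_append, List.countP_cons, hz]
        simp only [pvOcc, Bool.and_eq_true, decide_eq_true_eq]
        by_cases hmod : PySem.Int.mod p0 size < size - (F.length : Int)
        · rw [if_pos hmod, if_pos (⟨hpre0, hmod⟩ :
            F <+: List.drop p0.toNat L ∧ PySem.Int.mod p0 size < size - (F.length : Int))]
          push_cast
          ring
        · rw [if_neg hmod, if_neg (fun hco => hmod hco.2)]
          push_cast
          ring

lemma pvB_char (dna find : String) (size : Int) (hs : 0 < size - (find.toList.length : Int)) :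
    count_genome_in_dna_alt dna find size =
      ((PySem.List.pyRange 0 ((dna.toList.length : Int) + 1) 1).countP
        (pvOcc dna.toList find.toList size) : Int) := by
  unfold count_genome_in_dna_alt
  rw [if_neg (by omega)]
  rw [pvBloop_eq dna.toList find.toList size hs (dna.toList.length + 2) 0 0 le_rfl
    (by omega) (by omega)]
  ring

-- crop a filtered count of range(0,b) down to range(0,c) when the predicate is false on [c,b)
lemma pvCrop (P : Int → Bool) (c b : Int) (h0 : 0 ≤ c) (hcb : c ≤ b)
    (h : ∀ p, c ≤ p → p < b → ¬ P p = true) :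
    (PySem.List.pyRange 0 b 1).countP P = (PySem.List.pyRange 0 c 1).countP P := by
  rw [PySem.List.pyRange_one_append 0 c b h0 hcb, List.countP_append]
  have hz : (PySem.List.pyRange c b 1).countP P = 0 := by
    rw [List.countP_eq_zero]
    intro p hp
    rw [PySem.List.mem_pyRange_one] at hp
    exact h p hp.1 hp.2
  omega

-- slice match at p ↔ prefix occurrence wholly inside the string
lemma pvSlice_match (L F : List Char) {p : Int} (hp : 0 ≤ p) (hm : 0 < F.length) :
    PySem.List.slice L (some p) (some (p + (F.length : Int))) = F ↔
      (F <+: L.drop p.toNat ∧ p + (F.length : Int) ≤ (L.length : Int)) := by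
  rw [PySem.List.slice_toNat _ hp (by omega)]
  have hmt : (p + (F.length : Int)).toNat - p.toNat = F.length := by omega
  rw [hmt]
  have hd : (L.drop p.toNat).length = L.length - p.toNat := by
    rw [List.length_drop]
  constructor
  · intro h
    have hlen := congrArg List.length h
    rw [List.length_take, hd] at hlen
    refine ⟨?_, by omega⟩
    rw [← h]
    exact List.take_prefix _ _
  · rintro ⟨hpre, _⟩
    exact ((List.prefix_iff_eq_take.mp hpre)).symm

-- on empty find, A counts every position of every block, including those past the end of dna
lemma pvA_empty (dna find : String) (size : Int) (hs : 0 < size) (hF : find.toList = []) :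
    count_genome_in_dna dna find size = size * pvCeil (dna.toList.length : Int) size := by
  rw [pvA_char dna find size hs]
  have hb := pvCeil_bracket (a := (dna.toList.length : Int)) hs
  have hE : 0 ≤ size * pvCeil (dna.toList.length : Int) size := by
    have hn : (0 : Int) ≤ (dna.toList.length : Int) := by positivity
    nlinarith [hb.2]
  rw [List.countP_eq_length.mpr ?_, PySem.List.length_pyRange_one]
  · omega
  · intro p hp
    rw [PySem.List.mem_pyRange_one] at hp
    simp only [pvCond, Bool.and_eq_true, decide_eq_true_eq]
    have hmz : ((find.toList.length : Int)) = 0 := by rw [hF]; rfl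
    constructor
    · rw [hmz, add_zero, hF, PySem.List.slice_toNat _ (by omega) (by omega)]
      simp
    · rw [hmz, sub_zero]
      exact PySem.Int.mod_lt p hs

-- on empty find, B counts the n+1 real positions where "" occurs
lemma pvB_empty (dna find : String) (size : Int) (hs : 0 < size) (hF : find.toList = []) :
    count_genome_in_dna_alt dna find size = (dna.toList.length : Int) + 1 := by
  have hmz : ((find.toList.length : Int)) = 0 := by rw [hF]; rfl
  rw [pvB_char dna find size (by omega)]
  rw [List.countP_eq_length.mpr ?_, PySem.List.length_pyRange_one]
  · omega
  · intro p hp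
    rw [PySem.List.mem_pyRange_one] at hp
    simp only [pvOcc, Bool.and_eq_true, decide_eq_true_eq]
    refine ⟨by rw [hF]; exact List.nil_prefix, ?_⟩
    rw [hmz, sub_zero]
    exact PySem.Int.mod_lt p hs

-- ===== VERDICT (by name: the statement is the Claim_ definition above) =====
theorem count_genome_in_dna_spec : Claim_unchanged_count_genome_in_dna := by
  intro dna find size _hdom hpre
  unfold Pre_count_genome_in_dna at hpre
  unfold Spec_count_genome_in_dna
  intro hnd
  by_cases hs : 0 < size
  · by_cases hF : find.toList = []
    · have h2 : 2 ≤ size ∧ PySem.Int.mod (dna.toList.length : Int) size = size - 1 := by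
        by_contra hco
        exact hnd ⟨hF, hs, hco⟩
      rw [pvA_empty dna find size hs hF, pvB_empty dna find size hs hF]
      have hq := PySem.Int.floordiv_mul_add_mod (dna.toList.length : Int) size
      have hceil : pvCeil (dna.toList.length : Int) size =
          PySem.Int.floordiv (dna.toList.length : Int) size + 1 := by
        apply (PySem.Int.neg_floordiv_neg_eq_iff_of_pos hs).mpr
        have e1 : (PySem.Int.floordiv (dna.toList.length : Int) size + 1 - 1) * size =
            PySem.Int.floordiv (dna.toList.length : Int) size * size := by ring
        have e2 : (PySem.Int.floordiv (dna.toList.length : Int) size + 1) * size =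
            PySem.Int.floordiv (dna.toList.length : Int) size * size + size := by ring
        constructor
        · rw [e1]; omega
        · rw [e2]; omega
      rw [hceil]
      have e3 : size * (PySem.Int.floordiv (dna.toList.length : Int) size + 1) =
          PySem.Int.floordiv (dna.toList.length : Int) size * size + size := by ring
      omega
    · have hm : 0 < find.toList.length := by
        have : find.toList.length ≠ 0 := fun h => hF (List.eq_nil_of_length_eq_zero h)
        omega
      by_cases hlim : size - (find.toList.length : Int) ≤ 0
      · have hB : count_genome_in_dna_alt dna find size = 0 := by
          unfold count_genome_in_dna_alt
          rw [if_pos hlim]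
        rw [hB, pvA_char dna find size hs]
        rw [List.countP_eq_zero.mpr ?_]
        · rfl
        · intro p hp
          rw [PySem.List.mem_pyRange_one] at hp
          simp only [pvCond, Bool.and_eq_true, decide_eq_true_eq]
          rintro ⟨-, hmod⟩
          have := PySem.Int.mod_nonneg p hs
          omega
      · push_neg at hlim
        rw [pvA_char dna find size hs, pvB_char dna find size (by omega)]
        have hb := pvCeil_bracket (a := (dna.toList.length : Int)) hs
        have ec : size * pvCeil (dna.toList.length : Int) size =
            pvCeil (dna.toList.length : Int) size * size := by ring
        have hEge : (dna.toList.length : Int) ≤ size * pvCeil (dna.toList.length : Int) size := by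
          rw [ec]; exact hb.2
        have hA := pvCrop (pvCond dna.toList find.toList size) (dna.toList.length : Int)
          (size * pvCeil (dna.toList.length : Int) size) (by positivity) hEge ?hca
        case hca =>
          intro p hp1 _hp2 hct
          simp only [pvCond, Bool.and_eq_true, decide_eq_true_eq] at hct
          obtain ⟨hsl, -⟩ := hct
          have hdrop : List.drop p.toNat dna.toList = [] := List.drop_eq_nil_of_le (by omega)
          rw [PySem.List.slice_toNat _ (by omega) (by omega), hdrop, List.take_nil] at hsl
          exact hF hsl.symm
        have hB := pvCrop (pvOcc dna.toList find.toList size) (dna.toList.length : Int)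
          ((dna.toList.length : Int) + 1) (by positivity) (by omega) ?hcb
        case hcb =>
          intro p hp1 _hp2 hct
          simp only [pvOcc, Bool.and_eq_true, decide_eq_true_eq] at hct
          obtain ⟨hpre2, -⟩ := hct
          have hdrop : List.drop p.toNat dna.toList = [] := List.drop_eq_nil_of_le (by omega)
          rw [hdrop] at hpre2
          exact hF (List.prefix_nil.mp hpre2)
        rw [hA, hB]
        have hcong : (PySem.List.pyRange 0 (dna.toList.length : Int) 1).countP
            (pvCond dna.toList find.toList size) =
            (PySem.List.pyRange 0 (dna.toList.length : Int) 1).countP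
            (pvOcc dna.toList find.toList size) := by
          apply List.countP_congr
          intro p hp
          rw [PySem.List.mem_pyRange_one] at hp
          simp only [pvCond, pvOcc, Bool.and_eq_true, decide_eq_true_eq]
          rw [pvSlice_match dna.toList find.toList (by omega) hm]
          constructor
          · rintro ⟨⟨hpre2, -⟩, hmod⟩
            exact ⟨hpre2, hmod⟩
          · rintro ⟨hpre2, hmod⟩
            refine ⟨⟨hpre2, ?_⟩, hmod⟩
            have hle := hpre2.length_le
            rw [List.length_drop] at hle
            omega
        rw [hcong]
  · have hL : dna.toList = [] := by
      rcases hpre with h | h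
      · exact absurd h hs
      · exact h
    have hA : count_genome_in_dna dna find size = 0 := by
      unfold count_genome_in_dna
      rw [hL]
      simp [pvAouter]
    have hB : count_genome_in_dna_alt dna find size = 0 := by
      unfold count_genome_in_dna_alt
      rw [if_pos (by omega)]
    rw [hA, hB]

theorem count_genome_in_dna_changed : Claim_changed_count_genome_in_dna := by
  unfold Claim_changed_count_genome_in_dna; decide

theorem count_genome_in_dna_tight : Claim_exact_count_genome_in_dna := by
  intro dna find size _hdom _hpre hD
  unfold D_count_genome_in_dna at hD
  obtain ⟨hF, hs, hnot⟩ := hD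
  rw [pvA_empty dna find size hs hF, pvB_empty dna find size hs hF]
  have hq := PySem.Int.floordiv_mul_add_mod (dna.toList.length : Int) size
  have hr0 := PySem.Int.mod_nonneg (dna.toList.length : Int) hs
  have hrlt := PySem.Int.mod_lt (dna.toList.length : Int) hs
  by_cases hr : PySem.Int.mod (dna.toList.length : Int) size = 0
  · have hceil : pvCeil (dna.toList.length : Int) size =
        PySem.Int.floordiv (dna.toList.length : Int) size := by
      apply (PySem.Int.neg_floordiv_neg_eq_iff_of_pos hs).mpr
      have e1 : (PySem.Int.floordiv (dna.toList.length : Int) size - 1) * size =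
          PySem.Int.floordiv (dna.toList.length : Int) size * size - size := by ring
      constructor
      · rw [e1]; omega
      · omega
    rw [hceil]
    have e3 : size * PySem.Int.floordiv (dna.toList.length : Int) size =
        PySem.Int.floordiv (dna.toList.length : Int) size * size := by ring
    omega
  · have hsz2 : 2 ≤ size := by omega
    have hrne : PySem.Int.mod (dna.toList.length : Int) size ≠ size - 1 :=
      fun h => hnot ⟨hsz2, h⟩
    have hceil : pvCeil (dna.toList.length : Int) size =
        PySem.Int.floordiv (dna.toList.length : Int) size + 1 := by
      apply (PySem.Int.neg_floordiv_neg_eq_iff_of_pos hs).mpr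
      have e1 : (PySem.Int.floordiv (dna.toList.length : Int) size + 1 - 1) * size =
          PySem.Int.floordiv (dna.toList.length : Int) size * size := by ring
      have e2 : (PySem.Int.floordiv (dna.toList.length : Int) size + 1) * size =
          PySem.Int.floordiv (dna.toList.length : Int) size * size + size := by ring
      constructor
      · rw [e1]; omega
      · rw [e2]; omega
    rw [hceil]
    have e3 : size * (PySem.Int.floordiv (dna.toList.length : Int) size + 1) =
        PySem.Int.floordiv (dna.toList.length : Int) size * size + size := by ring
    omega
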